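-- pv_equiv track=rewrite | github.com/h3x89/hackerrank | codesignal/91.2.3.py | solution
-- ===== SOURCE A (Python) =====
-- def solution(n):
--     result = 0
--     multiplier = 1
--
--     # Handle special case for 0
--     if n == 0:
--         return 0
--
--     while n > 0:
--         digit = n % 10
--         # Add the digit twice, shifting the second one by multiplier
--         result += (digit * multiplier) + (digit * multiplier * 10)
--         multiplier *= 100  # Move two positions for next digit pair
--         n //= 10
--     return result
-- ===== SOURCE B (Python) =====
-- def solution(n):
--     if n <= 0:
--         return 0
--     return solution(n // 10) * 100 + (n % 10) * 11
-- ===== Notes on version B (the rewrite author's own statement) =====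
-- stated objective: simpler
-- what changed: Replaces the while loop with result/multiplier accumulator state by a three-line structural recursion that appends each doubled digit (eleven times the digit) onto a hundred times the recursive result.
import Mathlib
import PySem

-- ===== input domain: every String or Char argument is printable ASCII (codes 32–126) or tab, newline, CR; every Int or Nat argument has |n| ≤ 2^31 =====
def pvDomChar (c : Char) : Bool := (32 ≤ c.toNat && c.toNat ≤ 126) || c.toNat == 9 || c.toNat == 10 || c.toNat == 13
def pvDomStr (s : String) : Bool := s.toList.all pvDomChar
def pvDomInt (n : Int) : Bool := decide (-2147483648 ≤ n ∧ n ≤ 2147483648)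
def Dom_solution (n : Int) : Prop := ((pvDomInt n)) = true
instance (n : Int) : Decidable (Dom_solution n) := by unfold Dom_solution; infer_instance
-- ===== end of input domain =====

-- B replaces A's while loop with accumulator/multiplier state by a structural recursion (simpler).

-- ===== PORT A =====
-- the while loop of A, over the same state (n, result, multiplier)
def solutionLoop (n result multiplier : Int) : Int :=
  if h : n > 0 then
    solutionLoop (PySem.Int.floordiv n 10)
      (result + ((PySem.Int.mod n 10) * multiplier + (PySem.Int.mod n 10) * multiplier * 10))
      (multiplier * 100)
  else result
termination_by n.toNat
decreasing_by
  have h10 : PySem.Int.floordiv n 10 = n / 10 := PySem.Int.floordiv_eq_ediv_of_pos (by omega)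
  rw [h10]; omega

def solution (n : Int) : Int :=
  if n = 0 then 0 else solutionLoop n 0 1

-- ===== PORT B =====
def solution_alt (n : Int) : Int :=
  if h : n ≤ 0 then 0
  else solution_alt (PySem.Int.floordiv n 10) * 100 + (PySem.Int.mod n 10) * 11
termination_by n.toNat
decreasing_by
  have h10 : PySem.Int.floordiv n 10 = n / 10 := PySem.Int.floordiv_eq_ediv_of_pos (by omega)
  rw [h10]; omega

-- ===== PRECONDITION & SPEC =====
def Spec_solution (n : Int) (out : Int) : Prop := out = solution_alt n
instance (n : Int) (out : Int) : Decidable (Spec_solution n out) := by unfold Spec_solution; infer_instance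

-- ===== CLAIM (what is proved, stated in full; the proofs are below) =====
def Claim_equal_solution : Prop := ∀ (n : Int), Dom_solution n → Spec_solution n (solution n)

-- ===== LEMMAS AND PROOFS =====

-- Loop invariant: the while loop computes result + multiplier * (duplicated digits of n).
theorem solutionLoop_inv (n : Int) :
    ∀ (result multiplier : Int),
      solutionLoop n result multiplier = result + multiplier * solution_alt n := by
  by_cases h : n > 0
  case pos =>
    have h10 : PySem.Int.floordiv n 10 = n / 10 := PySem.Int.floordiv_eq_ediv_of_pos (by omega)
    have ih : ∀ r m : Int,
        solutionLoop (PySem.Int.floordiv n 10) r m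
          = r + m * solution_alt (PySem.Int.floordiv n 10) := by
      have : (PySem.Int.floordiv n 10).toNat < n.toNat := by rw [h10]; omega
      exact solutionLoop_inv (PySem.Int.floordiv n 10)
    intro result multiplier
    rw [solutionLoop, dif_pos h, ih]
    conv_rhs => rw [solution_alt, dif_neg (by omega : ¬ n ≤ 0)]
    ring
  case neg =>
    intro result multiplier
    rw [solutionLoop, dif_neg h, solution_alt, dif_pos (by omega : n ≤ 0)]
    ring
termination_by n.toNat

-- ===== VERDICT (by name: the statement is the Claim_ definition above) =====
theorem solution_spec : Claim_equal_solution := by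
  intro n _
  unfold Spec_solution solution
  by_cases h0 : n = 0
  · rw [if_pos h0, h0, solution_alt]; simp
  · rw [if_neg h0, solutionLoop_inv]; ring
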